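-- pv_equiv track=rewrite | github.com/jikhanjung/ScoreEye | detect_measure.py | _group_nearby_candidates
-- ===== SOURCE A (Python) =====
-- def _group_nearby_candidates(candidates, max_distance=5):
--     """Group nearby barline candidates that likely represent the same line.
--
--     Args:
--         candidates (list): List of x-coordinates
--         max_distance (int): Maximum distance to consider candidates as the same line
--
--     Returns:
--         list: Grouped candidates (represented by their center)
--     """
--     if not candidates:
--         return []
--
--     candidates.sort()
--     groups = []
--     current_group = [candidates[0]]
--
--     for x in candidates[1:]:
--         if x - current_group[-1] <= max_distance:
--             current_group.append(x)
--         else: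
--             # Finalize current group
--             center = sum(current_group) // len(current_group)
--             groups.append(center)
--             current_group = [x]
--
--     # Add last group
--     if current_group:
--         center = sum(current_group) // len(current_group)
--         groups.append(center)
--
--     return groups
-- ===== SOURCE B (Python) =====
-- def _group_nearby_candidates(candidates, max_distance=5):
--     """Breakpoints-then-segments: sort in place, collect the cut indices where
--     the gap to the previous element exceeds max_distance, then slice the sorted
--     list at those cuts and emit each segment's integer mean."""
--     candidates.sort()
--     if not candidates:
--         return []
--     n = len(candidates)
--     cuts = [i for i in range(1, n) if candidates[i] - candidates[i - 1] > max_distance]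
--     bounds = [0] + cuts + [n]
--     return [sum(candidates[a:b]) // (b - a) for a, b in zip(bounds, bounds[1:])]
-- ===== Notes on version B (the rewrite author's own statement) =====
-- stated objective: alternative
-- what changed: Replaces A's incremental append-or-finalize loop that materializes each group as a list with a staged breakpoints-then-segments decomposition: one pass collects the cut indices where the sorted gap exceeds max_distance, then the sorted list is sliced at those cuts and a comprehension emits each segment's integer mean.
import Mathlib
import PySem

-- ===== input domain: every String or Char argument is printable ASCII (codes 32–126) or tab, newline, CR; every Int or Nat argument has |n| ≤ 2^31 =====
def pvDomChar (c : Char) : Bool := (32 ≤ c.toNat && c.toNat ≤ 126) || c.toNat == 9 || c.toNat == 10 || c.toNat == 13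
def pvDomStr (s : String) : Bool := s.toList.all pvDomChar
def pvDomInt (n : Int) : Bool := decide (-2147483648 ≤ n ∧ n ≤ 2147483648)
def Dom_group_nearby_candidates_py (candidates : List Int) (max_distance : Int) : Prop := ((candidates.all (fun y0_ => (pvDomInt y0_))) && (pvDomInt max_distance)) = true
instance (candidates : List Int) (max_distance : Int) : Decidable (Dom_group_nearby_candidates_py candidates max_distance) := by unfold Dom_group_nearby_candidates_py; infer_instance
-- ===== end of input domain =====

-- B uses a staged breakpoints-then-segments decomposition: collect the cut indices
-- where the sorted gap exceeds max_distance, slice the sorted list at the cuts and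
-- emit each segment's integer mean; like A it sorts the argument in place, and the
-- equivalence proved is about the return value.


-- ===== PORT A =====
-- center = sum(current_group) // len(current_group)
def pvAvg (g : List Int) : Int := PySem.Int.floordiv g.sum (g.length : Int)

-- the body of A's for-loop: state = (groups, current_group)
def pvStepA (md : Int) (st : List Int × List Int) (x : Int) : List Int × List Int :=
  if x - st.2.getLast! ≤ md then (st.1, st.2 ++ [x])
  else (st.1 ++ [pvAvg st.2], [x])

def group_nearby_candidates_py (candidates : List Int) (max_distance : Int) : List Int :=
  if candidates = [] then []
  else
    match PySem.List.sorted candidates (fun x => x) false with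
    | [] => []   -- unreachable: sorted of a nonempty list is nonempty
    | h :: t =>
      let st := t.foldl (pvStepA max_distance) ([], [h])
      if st.2 ≠ [] then st.1 ++ [pvAvg st.2] else st.1

-- ===== PORT B =====
-- cuts = [i for i in range(1, n) if candidates[i] - candidates[i-1] > max_distance]
def pvCuts (s : List Int) (md : Int) : List Int :=
  (PySem.List.pyRange 1 (s.length : Int) 1).filter
    (fun i => decide (PySem.List.pyGetD s i 0 - PySem.List.pyGetD s (i - 1) 0 > md))

def group_nearby_candidates_py_alt (candidates : List Int) (max_distance : Int) : List Int :=
  let s := PySem.List.sorted candidates (fun x => x) false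
  if s = [] then []
  else
    let bounds := [(0 : Int)] ++ pvCuts s max_distance ++ [(s.length : Int)]
    -- zip(bounds, bounds[1:]); sum(candidates[a:b]) // (b - a)
    (bounds.zip (PySem.List.slice bounds (some 1) none)).map
      (fun ab => PySem.Int.floordiv (PySem.List.slice s (some ab.1) (some ab.2)).sum (ab.2 - ab.1))

-- ===== PRECONDITION & SPEC =====
def Spec_group_nearby_candidates_py (candidates : List Int) (max_distance : Int) (out : List Int) : Prop := out = group_nearby_candidates_py_alt candidates max_distance
instance (candidates : List Int) (max_distance : Int) (out : List Int) : Decidable (Spec_group_nearby_candidates_py candidates max_distance out) := by unfold Spec_group_nearby_candidates_py; infer_instance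

-- ===== CLAIM (what is proved, stated in full; the proofs are below) =====
def Claim_equal_group_nearby_candidates_py : Prop := ∀ (candidates : List Int) (max_distance : Int), Dom_group_nearby_candidates_py candidates max_distance → Spec_group_nearby_candidates_py candidates max_distance (group_nearby_candidates_py candidates max_distance)

-- ===== LEMMAS AND PROOFS =====

-- proof-side bridge: the list of segments both programs implicitly cut the sorted list into,
-- built element by element from the right (one step = pvStepB)
def pvStepB (md : Int) (x : Int) (segs : List (List Int)) : List (List Int) :=
  match segs with
  | (y :: ys) :: rest => if y - x ≤ md then (x :: y :: ys) :: rest else [x] :: (y :: ys) :: rest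
  | s => [x] :: s

-- A's pending current_group attached onto the front of the segment list
def pvAttach (md : Int) (cur : List Int) (g : List (List Int)) : List (List Int) :=
  match g with
  | (y :: ys) :: rest => if y - cur.getLast! ≤ md then (cur ++ y :: ys) :: rest else cur :: (y :: ys) :: rest
  | g => cur :: g

theorem pvGetLast!_concat (cur : List Int) (x : Int) : (cur ++ [x]).getLast! = x := by
  cases cur with
  | nil => rfl
  | cons c cs => simp [List.getLast!]

theorem pvAttach_single (md x : Int) (g : List (List Int)) :
    pvAttach md [x] g = pvStepB md x g := by
  cases g with
  | nil => rfl
  | cons s rest => cases s with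
    | nil => rfl
    | cons y ys => simp [pvAttach, pvStepB, List.getLast!]

theorem pvAttach_step_le (md x : Int) (cur : List Int) (g : List (List Int))
    (h : x - cur.getLast! ≤ md) :
    pvAttach md cur (pvStepB md x g) = pvAttach md (cur ++ [x]) g := by
  cases g with
  | nil =>
    show pvAttach md cur [[x]] = (cur ++ [x]) :: []
    simp only [pvAttach]
    rw [if_pos h]
  | cons s rest =>
    cases s with
    | nil =>
      show pvAttach md cur ([x] :: [] :: rest) = (cur ++ [x]) :: [] :: rest
      simp only [pvAttach]
      rw [if_pos h]
    | cons y ys =>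
      by_cases hy : y - x ≤ md
      · show pvAttach md cur (if y - x ≤ md then (x :: y :: ys) :: rest else [x] :: (y :: ys) :: rest)
          = if y - (cur ++ [x]).getLast! ≤ md then ((cur ++ [x]) ++ y :: ys) :: rest else (cur ++ [x]) :: (y :: ys) :: rest
        rw [if_pos hy, pvGetLast!_concat, if_pos hy]
        simp only [pvAttach]
        rw [if_pos h]
        simp
      · show pvAttach md cur (if y - x ≤ md then (x :: y :: ys) :: rest else [x] :: (y :: ys) :: rest)
          = if y - (cur ++ [x]).getLast! ≤ md then ((cur ++ [x]) ++ y :: ys) :: rest else (cur ++ [x]) :: (y :: ys) :: rest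
        rw [if_neg hy, pvGetLast!_concat, if_neg hy]
        simp only [pvAttach]
        rw [if_pos h]

theorem pvAttach_step_gt (md x : Int) (cur : List Int) (g : List (List Int))
    (h : ¬ x - cur.getLast! ≤ md) :
    pvAttach md cur (pvStepB md x g) = cur :: pvStepB md x g := by
  cases g with
  | nil =>
    show pvAttach md cur [[x]] = cur :: [[x]]
    simp only [pvAttach]
    rw [if_neg h]
  | cons s rest =>
    cases s with
    | nil =>
      show pvAttach md cur ([x] :: [] :: rest) = cur :: [x] :: [] :: rest
      simp only [pvAttach]
      rw [if_neg h]
    | cons y ys =>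
      by_cases hy : y - x ≤ md
      · show pvAttach md cur (if y - x ≤ md then (x :: y :: ys) :: rest else [x] :: (y :: ys) :: rest)
          = cur :: (if y - x ≤ md then (x :: y :: ys) :: rest else [x] :: (y :: ys) :: rest)
        rw [if_pos hy]
        simp only [pvAttach]
        rw [if_neg h]
      · show pvAttach md cur (if y - x ≤ md then (x :: y :: ys) :: rest else [x] :: (y :: ys) :: rest)
          = cur :: (if y - x ≤ md then (x :: y :: ys) :: rest else [x] :: (y :: ys) :: rest)
        rw [if_neg hy]
        simp only [pvAttach]
        rw [if_neg h]

-- A-side invariant: A's fold, finalized, equals groups ++ averages of the segments with cur attached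
theorem pvLoop_eq (md : Int) (t : List Int) : ∀ (groups cur : List Int), cur ≠ [] →
    (if (t.foldl (pvStepA md) (groups, cur)).2 ≠ [] then
       (t.foldl (pvStepA md) (groups, cur)).1 ++ [pvAvg (t.foldl (pvStepA md) (groups, cur)).2]
     else (t.foldl (pvStepA md) (groups, cur)).1)
    = groups ++ (pvAttach md cur (t.foldr (pvStepB md) [])).map pvAvg := by
  induction t with
  | nil =>
    intro groups cur hcur
    rw [List.foldl_nil, List.foldr_nil, if_pos hcur]
    cases cur with
    | nil => exact absurd rfl hcur
    | cons c cs => rfl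
  | cons x t ih =>
    intro groups cur hcur
    rw [List.foldl_cons, List.foldr_cons]
    by_cases h : x - cur.getLast! ≤ md
    · rw [show pvStepA md (groups, cur) x = (groups, cur ++ [x]) from by
        simp only [pvStepA]; rw [if_pos h]]
      rw [ih groups (cur ++ [x]) (by simp), pvAttach_step_le md x cur _ h]
    · rw [show pvStepA md (groups, cur) x = (groups ++ [pvAvg cur], [x]) from by
        simp only [pvStepA]; rw [if_neg h]]
      rw [ih (groups ++ [pvAvg cur]) [x] (by simp), pvAttach_single,
        pvAttach_step_gt md x cur _ h]
      simp

-- ===== B-side lemmas =====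

-- consecutive pairs of a list (zip(bounds, bounds[1:]))
def pvPairs (l : List Int) : List (Int × Int) := l.zip l.tail

-- segments of s cut at the bounds
def pvSegs (s : List Int) (md : Int) : List (List Int) :=
  (pvPairs ([(0 : Int)] ++ pvCuts s md ++ [(s.length : Int)])).map
    (fun ab => PySem.List.slice s (some ab.1) (some ab.2))

theorem pvPairs_cons (a b : Int) (t : List Int) :
    pvPairs (a :: b :: t) = (a, b) :: pvPairs (b :: t) := rfl

theorem pvPairs_map_shift (l : List Int) :
    pvPairs (l.map (· + 1)) = (pvPairs l).map (fun ab => (ab.1 + 1, ab.2 + 1)) := by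
  cases l with
  | nil => rfl
  | cons a t =>
    show ((a :: t).map (· + 1)).zip ((a :: t).map (· + 1)).tail
      = ((a :: t).zip t).map (fun ab => (ab.1 + 1, ab.2 + 1))
    rw [show ((a :: t).map (· + 1)).tail = t.map (· + 1) from rfl, List.zip_map]
    exact List.map_congr_left (fun ab _ => rfl)

theorem pvGetD_cons_shift (x : Int) (s : List Int) (i : Int) (h : 1 ≤ i) :
    PySem.List.pyGetD (x :: s) i 0 = PySem.List.pyGetD s (i - 1) 0 := by
  obtain ⟨k, rfl⟩ : ∃ k : Nat, i = (k : Int) + 1 := ⟨(i - 1).toNat, by omega⟩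
  have h1 : ((k : Int) + 1) = ((k + 1 : Nat) : Int) := by push_cast; ring
  have h2 : ((k : Int) + 1 - 1) = (k : Int) := by ring
  rw [h2, h1, PySem.List.pyGetD_natCast, PySem.List.pyGetD_natCast, List.getD_cons_succ]

theorem pvRange_shift (n : Int) :
    PySem.List.pyRange 2 (n + 1) 1 = (PySem.List.pyRange 1 n 1).map (· + 1) := by
  rw [PySem.List.pyRange_one, PySem.List.pyRange_one]
  have : (n + 1 - 2).toNat = (n - 1).toNat := by omega
  rw [this, List.map_map]
  exact List.map_congr_left (fun a _ => by simp; ring)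

-- the cut indices of x :: s' are the gap test at 1 plus the cuts of s' shifted by one
theorem pvCuts_cons (md x y : Int) (ys : List Int) :
    pvCuts (x :: y :: ys) md
    = (if y - x > md then [(1 : Int)] else []) ++ (pvCuts (y :: ys) md).map (· + 1) := by
  unfold pvCuts
  have hlen : ((x :: y :: ys).length : Int) = ((y :: ys).length : Int) + 1 := by
    simp
  rw [hlen]
  set N : Int := ((y :: ys).length : Int) with hN
  have hN1 : 1 ≤ N := by
    have h0 : 0 < (y :: ys).length := by simp
    rw [hN]; exact_mod_cast h0
  rw [PySem.List.pyRange_one_cons (by omega), show (1 : Int) + 1 = 2 from rfl, pvRange_shift, List.filter_cons]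
  have hp1 : (decide (PySem.List.pyGetD (x :: y :: ys) 1 0 - PySem.List.pyGetD (x :: y :: ys) (1 - 1) 0 > md)) = decide (y - x > md) := by
    norm_num
    rw [show PySem.List.pyGetD (x :: y :: ys) 1 0 = y from by simp [PySem.List.pyGetD]]
  rw [hp1, List.filter_map]
  have hfc : ∀ i ∈ PySem.List.pyRange 1 N 1,
      ((fun i => decide (PySem.List.pyGetD (x :: y :: ys) i 0 - PySem.List.pyGetD (x :: y :: ys) (i - 1) 0 > md)) ∘ (· + 1)) i
      = (fun i => decide (PySem.List.pyGetD (y :: ys) i 0 - PySem.List.pyGetD (y :: ys) (i - 1) 0 > md)) i := by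
    intro i hi
    have hi1 : 1 ≤ i := (PySem.List.mem_pyRange_one.mp hi).1
    simp only [Function.comp]
    rw [pvGetD_cons_shift x _ (i + 1) (by omega), pvGetD_cons_shift x _ (i + 1 - 1) (by omega)]
    norm_num
  rw [List.filter_congr hfc]
  by_cases hg : y - x > md
  · simp [hg]
  · simp [hg]

theorem pvSlice_cons_shift (x : Int) (s : List Int) (a b : Int) (ha : 0 ≤ a) (hb : 0 ≤ b) :
    PySem.List.slice (x :: s) (some (a + 1)) (some (b + 1)) = PySem.List.slice s (some a) (some b) := by
  rw [PySem.List.slice_toNat _ (by omega) (by omega), PySem.List.slice_toNat _ ha hb]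
  have h1 : (a + 1).toNat = a.toNat + 1 := by omega
  have h2 : (b + 1).toNat - (a + 1).toNat = b.toNat - a.toNat := by omega
  rw [h2, h1, List.drop_succ_cons]

theorem pvSlice_zero_take (s : List Int) (b : Int) (hb : 0 ≤ b) :
    PySem.List.slice s (some 0) (some b) = s.take b.toNat := by
  rw [PySem.List.slice_toNat _ le_rfl hb]
  simp

theorem pvSlice_zero_cons (x : Int) (s : List Int) (b : Int) (hb : 0 ≤ b) :
    PySem.List.slice (x :: s) (some 0) (some (b + 1)) = x :: PySem.List.slice s (some 0) (some b) := by
  rw [pvSlice_zero_take _ _ (by omega), pvSlice_zero_take _ _ hb]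
  have : (b + 1).toNat = b.toNat + 1 := by omega
  rw [this, List.take_succ_cons]

theorem pvSlice_len (s : List Int) (a b : Int) (ha : 0 ≤ a) (hab : a < b) (hb : b ≤ (s.length : Int)) :
    ((PySem.List.slice s (some a) (some b)).length : Int) = b - a := by
  rw [PySem.List.slice_toNat _ ha (by omega)]
  simp only [List.length_take, List.length_drop]
  omega

theorem pvCuts_mem (s : List Int) (md : Int) : ∀ i ∈ pvCuts s md, 1 ≤ i ∧ i < (s.length : Int) := by
  intro i hi
  have := List.mem_filter.mp hi
  exact PySem.List.mem_pyRange_one.mp this.1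

theorem pvCuts_pairwise (s : List Int) (md : Int) : (pvCuts s md).Pairwise (· < ·) :=
  (PySem.List.pairwise_lt_pyRange_one 1 (s.length : Int)).filter _

theorem pvPairs_mem (l : List Int) (ab : Int × Int) (h : ab ∈ pvPairs l) : ab.1 ∈ l ∧ ab.2 ∈ l := by
  obtain ⟨h1, h2⟩ := List.of_mem_zip (by simpa [pvPairs] using h)
  exact ⟨h1, List.mem_of_mem_tail h2⟩

theorem pvPairs_lt : ∀ (l : List Int), l.Pairwise (· < ·) → ∀ ab ∈ pvPairs l, ab.1 < ab.2 := by
  intro l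
  induction l with
  | nil => intro _ ab h; simp [pvPairs] at h
  | cons a t ih =>
    intro hp ab hab
    cases t with
    | nil => simp [pvPairs] at hab
    | cons b t' =>
      rw [pvPairs_cons] at hab
      rcases List.mem_cons.mp hab with h | h
      · subst h
        exact (List.pairwise_cons.mp hp).1 b (by simp)
      · exact ih (List.pairwise_cons.mp hp).2 ab h

-- shifting both bounds of every consecutive pair undoes a cons on the sliced list
theorem pvMapShiftSlice (x : Int) (s : List Int) (l : List Int) (h : ∀ v ∈ l, 0 ≤ v) :
    (pvPairs (l.map (· + 1))).map (fun ab => PySem.List.slice (x :: s) (some ab.1) (some ab.2))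
    = (pvPairs l).map (fun ab => PySem.List.slice s (some ab.1) (some ab.2)) := by
  rw [pvPairs_map_shift, List.map_map]
  refine List.map_congr_left (fun ab hab => ?_)
  obtain ⟨h1, h2⟩ := pvPairs_mem l ab hab
  exact pvSlice_cons_shift x s ab.1 ab.2 (h _ h1) (h _ h2)

theorem pvStepB_cons_le (md x y : Int) (c : List Int) (rest : List (List Int)) (h : y - x ≤ md) :
    pvStepB md x ((y :: c) :: rest) = (x :: y :: c) :: rest := by simp [pvStepB, h]

theorem pvStepB_cons_gt (md x y : Int) (c : List Int) (rest : List (List Int)) (h : ¬ y - x ≤ md) :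
    pvStepB md x ((y :: c) :: rest) = [x] :: (y :: c) :: rest := by simp [pvStepB, h]

-- the segment list cut at the gap indices IS the chunk list built by pvStepB
theorem pvSegs_eq (md : Int) : ∀ (t : List Int) (x : Int),
    pvSegs (x :: t) md = (x :: t).foldr (pvStepB md) [] := by
  intro t
  induction t with
  | nil =>
    intro x
    show pvSegs [x] md = [[x]]
    unfold pvSegs pvCuts
    rw [show (([x] : List Int).length : Int) = 1 from by simp,
      PySem.List.pyRange_one_eq_nil (by norm_num : (1 : Int) ≤ 1)]
    have h1 : PySem.List.slice [x] (some 0) (some 1) = [x] := by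
      rw [show (1 : Int) = 0 + 1 from by norm_num, pvSlice_zero_cons x [] 0 le_rfl]; rfl
    show [PySem.List.slice [x] (some 0) (some 1)].map id = [[x]]
    rw [h1]
    rfl
  | cons y ys ih =>
    intro x
    have h0 : 0 < (y :: ys).length := by simp
    have hN1 : (1 : Int) ≤ ((y :: ys).length : Int) := by exact_mod_cast h0
    cases hm : pvCuts (y :: ys) md ++ [((y :: ys).length : Int)] with
    | nil => exact absurd hm (by simp)
    | cons b0 r2 =>
      have hmem : ∀ v ∈ b0 :: r2, 1 ≤ v ∧ v ≤ ((y :: ys).length : Int) := by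
        rw [← hm]
        intro v hv
        rcases List.mem_append.mp hv with h | h
        · have := pvCuts_mem _ _ v h
          omega
        · have : v = ((y :: ys).length : Int) := by simpa using h
          omega
      have hb0 := hmem b0 (by simp)
      have hsegs' : pvSegs (y :: ys) md
          = PySem.List.slice (y :: ys) (some 0) (some b0)
            :: (pvPairs (b0 :: r2)).map (fun ab => PySem.List.slice (y :: ys) (some ab.1) (some ab.2)) := by
        unfold pvSegs
        rw [show ([(0 : Int)] ++ pvCuts (y :: ys) md ++ [((y :: ys).length : Int)])
            = 0 :: (pvCuts (y :: ys) md ++ [((y :: ys).length : Int)]) from rfl, hm,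
          pvPairs_cons, List.map_cons]
      have hhead : PySem.List.slice (y :: ys) (some 0) (some b0)
          = y :: List.take (b0.toNat - 1) ys := by
        rw [pvSlice_zero_take _ _ (by omega)]
        obtain ⟨k, hk⟩ : ∃ k, b0.toNat = k + 1 := ⟨b0.toNat - 1, by omega⟩
        rw [hk, List.take_succ_cons]
        simp
      have hch : (y :: ys).foldr (pvStepB md) [] = pvSegs (y :: ys) md := (ih y).symm
      have hlenc : ((x :: y :: ys).length : Int) = ((y :: ys).length : Int) + 1 := by simp
      rw [List.foldr_cons, hch, hsegs', hhead]
      by_cases hgap : y - x > md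
      · -- new cut at index 1: segment [x] splits off
        have hbounds : [(0 : Int)] ++ pvCuts (x :: y :: ys) md ++ [((x :: y :: ys).length : Int)]
            = 0 :: ((0 :: b0 :: r2).map (· + 1)) := by
          rw [pvCuts_cons, if_pos hgap, hlenc]
          show 0 :: (([(1 : Int)] ++ (pvCuts (y :: ys) md).map (· + 1)) ++ [((y :: ys).length : Int) + 1])
            = 0 :: ((0 :: b0 :: r2).map (· + 1))
          rw [← hm]
          simp
        unfold pvSegs
        rw [hbounds, show ((0 : Int) :: b0 :: r2).map (· + 1) = 1 :: ((b0 :: r2).map (· + 1)) from by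
            simp, pvPairs_cons, List.map_cons,
          show ((1 : Int) :: (b0 :: r2).map (· + 1)) = (0 :: b0 :: r2).map (· + 1) from by simp,
          pvMapShiftSlice x (y :: ys) (0 :: b0 :: r2)
            (fun v hv => by rcases List.mem_cons.mp hv with h | h; · omega
                            · exact le_trans (by norm_num) (hmem v h).1)]
        rw [show PySem.List.slice (x :: y :: ys) (some 0) (some 1) = [x] from by
          rw [show (1 : Int) = 0 + 1 from rfl, pvSlice_zero_cons x (y :: ys) 0 le_rfl]; rfl]
        show [x] :: (pvPairs (0 :: b0 :: r2)).map (fun ab => PySem.List.slice (y :: ys) (some ab.1) (some ab.2))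
          = pvStepB md x ((y :: List.take (b0.toNat - 1) ys)
              :: (pvPairs (b0 :: r2)).map (fun ab => PySem.List.slice (y :: ys) (some ab.1) (some ab.2)))
        rw [pvStepB_cons_gt md x y _ _ (by omega), pvPairs_cons, List.map_cons, hhead]
      · -- x merges into the first segment
        have hbounds : [(0 : Int)] ++ pvCuts (x :: y :: ys) md ++ [((x :: y :: ys).length : Int)]
            = 0 :: ((b0 :: r2).map (· + 1)) := by
          rw [pvCuts_cons, if_neg hgap, hlenc]
          show 0 :: ((pvCuts (y :: ys) md).map (· + 1) ++ [((y :: ys).length : Int) + 1])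
            = 0 :: ((b0 :: r2).map (· + 1))
          rw [← hm]
          simp
        unfold pvSegs
        rw [hbounds, show ((b0 : Int) :: r2).map (· + 1) = (b0 + 1) :: r2.map (· + 1) from by simp,
          pvPairs_cons, List.map_cons,
          show ((b0 + 1) :: r2.map (· + 1)) = (b0 :: r2).map (· + 1) from by simp,
          pvMapShiftSlice x (y :: ys) (b0 :: r2)
            (fun v hv => le_trans (by norm_num) (hmem v hv).1)]
        rw [show PySem.List.slice (x :: y :: ys) (some 0) (some (b0 + 1))
            = x :: PySem.List.slice (y :: ys) (some 0) (some b0) from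
          pvSlice_zero_cons x (y :: ys) b0 (by omega), hhead]
        rw [pvStepB_cons_le md x y _ _ (by omega)]

theorem pvBounds_facts (s : List Int) (md : Int) (hs : s ≠ []) :
    ((0 : Int) :: (pvCuts s md ++ [(s.length : Int)])).Pairwise (· < ·)
    ∧ ∀ v ∈ (0 : Int) :: (pvCuts s md ++ [(s.length : Int)]), 0 ≤ v ∧ v ≤ (s.length : Int) := by
  have hN1 : (1 : Int) ≤ (s.length : Int) := by
    have h0 : 0 < s.length := List.length_pos_iff.mpr hs
    exact_mod_cast h0
  constructor
  · rw [List.pairwise_cons]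
    refine ⟨?_, ?_⟩
    · intro v hv
      rcases List.mem_append.mp hv with h | h
      · have := pvCuts_mem s md v h; omega
      · have : v = (s.length : Int) := by simpa using h
        omega
    · rw [List.pairwise_append]
      refine ⟨pvCuts_pairwise s md, by simp, ?_⟩
      intro a ha b hb
      have : b = (s.length : Int) := by simpa using hb
      subst this
      exact (pvCuts_mem s md a ha).2
  · intro v hv
    rcases List.mem_cons.mp hv with h | h
    · omega
    · rcases List.mem_append.mp h with h | h
      · have := pvCuts_mem s md v h; omega
      · have : v = (s.length : Int) := by simpa using h
        omega

theorem pvPairs_def (l : List Int) : l.zip l.tail = pvPairs l := rfl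

theorem pvZeroCons (a b : List Int) : [(0 : Int)] ++ a ++ b = 0 :: (a ++ b) := rfl

-- B computes the averages of the chunk list
theorem pvAlt_eq (candidates : List Int) (md : Int)
    (hs : PySem.List.sorted candidates (fun x => x) false ≠ []) :
    group_nearby_candidates_py_alt candidates md
    = ((PySem.List.sorted candidates (fun x => x) false).foldr (pvStepB md) []).map pvAvg := by
  simp only [group_nearby_candidates_py_alt]
  rw [if_neg hs]
  rw [PySem.List.slice_from_one, pvPairs_def, pvZeroCons]
  obtain ⟨hpw, hmem⟩ := pvBounds_facts (PySem.List.sorted candidates (fun x => x) false) md hs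
  have hcongr : ∀ ab ∈ pvPairs ((0 : Int) :: (pvCuts (PySem.List.sorted candidates (fun x => x) false) md
      ++ [((PySem.List.sorted candidates (fun x => x) false).length : Int)])),
      PySem.Int.floordiv (PySem.List.slice (PySem.List.sorted candidates (fun x => x) false) (some ab.1) (some ab.2)).sum (ab.2 - ab.1)
      = pvAvg (PySem.List.slice (PySem.List.sorted candidates (fun x => x) false) (some ab.1) (some ab.2)) := by
    intro ab hab
    obtain ⟨h1, h2⟩ := pvPairs_mem _ ab hab
    have hlt := pvPairs_lt _ hpw ab hab
    have ha := hmem ab.1 h1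
    have hb := hmem ab.2 h2
    unfold pvAvg
    rw [pvSlice_len _ ab.1 ab.2 ha.1 hlt hb.2]
  rw [List.map_congr_left hcongr, show
      (fun ab : Int × Int => pvAvg (PySem.List.slice (PySem.List.sorted candidates (fun x => x) false) (some ab.1) (some ab.2)))
      = pvAvg ∘ (fun ab : Int × Int => PySem.List.slice (PySem.List.sorted candidates (fun x => x) false) (some ab.1) (some ab.2)) from rfl,
    ← List.map_map]
  have hsegs : (pvPairs ((0 : Int) :: (pvCuts (PySem.List.sorted candidates (fun x => x) false) md
      ++ [((PySem.List.sorted candidates (fun x => x) false).length : Int)]))).map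
      (fun ab => PySem.List.slice (PySem.List.sorted candidates (fun x => x) false) (some ab.1) (some ab.2))
      = pvSegs (PySem.List.sorted candidates (fun x => x) false) md := rfl
  rw [hsegs]
  cases h : PySem.List.sorted candidates (fun x => x) false with
  | nil => exact absurd h hs
  | cons a t => rw [pvSegs_eq md t a]

-- ===== VERDICT (by name: the statement is the Claim_ definition above) =====
theorem group_nearby_candidates_py_spec : Claim_equal_group_nearby_candidates_py := by
  intro candidates md _
  unfold Spec_group_nearby_candidates_py
  by_cases hc : candidates = []
  · subst hc; rfl
  · have hs : PySem.List.sorted candidates (fun x => x) false ≠ [] := by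
      simpa [PySem.List.sorted_eq_nil_iff] using hc
    rw [pvAlt_eq candidates md hs]
    unfold group_nearby_candidates_py
    cases h : PySem.List.sorted candidates (fun x => x) false with
    | nil => exact absurd h hs
    | cons a t =>
      rw [if_neg hc]
      show (if (t.foldl (pvStepA md) ([], [a])).2 ≠ [] then
              (t.foldl (pvStepA md) ([], [a])).1 ++ [pvAvg (t.foldl (pvStepA md) ([], [a])).2]
            else (t.foldl (pvStepA md) ([], [a])).1)
         = ((a :: t).foldr (pvStepB md) []).map pvAvg
      rw [pvLoop_eq md t [] [a] (by simp), List.foldr_cons, ← pvAttach_single]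
      simp
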